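-- pv_equiv track=rewrite | github.com/mikegorlin/OpenUnderwriter | src/do_uw/stages/score/peril_mapping.py | _resolve_lens_defaults
-- ===== SOURCE A (Python) =====
-- def _resolve_lens_defaults(
--     signal_id: str, lens_defaults: dict[str, list[str]],
-- ) -> list[str]:
--     """Resolve lens defaults for signal_id using prefix matching."""
--     if signal_id in lens_defaults:
--         return lens_defaults[signal_id]
--     parts = signal_id.split(".")
--     for i in range(len(parts) - 1, 0, -1):
--         prefix = ".".join(parts[:i])
--         if prefix in lens_defaults:
--             return lens_defaults[prefix]
--     return []
-- ===== SOURCE B (Python) =====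
-- def _resolve_lens_defaults(
--     signal_id: str, lens_defaults: dict[str, list[str]],
-- ) -> list[str]:
--     """Resolve lens defaults for signal_id: one pass over the table picking the
--     longest key that is signal_id itself or a dot-prefix of it."""
--     best = None
--     for key in lens_defaults:
--         if key == signal_id or signal_id.startswith(key + "."):
--             if best is None or len(key) > len(best):
--                 best = key
--     return lens_defaults[best] if best is not None else []
-- ===== Notes on version B (the rewrite author's own statement) =====
-- stated objective: alternative
-- what changed: Instead of generating each dot-prefix of signal_id (split, join of slices) and probing the dict longest-first, B makes a single pass over the dict's keys, keeps the longest key that equals signal_id or is a dot-prefix of it (tested with startswith), and looks that key up once.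
import Mathlib
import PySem

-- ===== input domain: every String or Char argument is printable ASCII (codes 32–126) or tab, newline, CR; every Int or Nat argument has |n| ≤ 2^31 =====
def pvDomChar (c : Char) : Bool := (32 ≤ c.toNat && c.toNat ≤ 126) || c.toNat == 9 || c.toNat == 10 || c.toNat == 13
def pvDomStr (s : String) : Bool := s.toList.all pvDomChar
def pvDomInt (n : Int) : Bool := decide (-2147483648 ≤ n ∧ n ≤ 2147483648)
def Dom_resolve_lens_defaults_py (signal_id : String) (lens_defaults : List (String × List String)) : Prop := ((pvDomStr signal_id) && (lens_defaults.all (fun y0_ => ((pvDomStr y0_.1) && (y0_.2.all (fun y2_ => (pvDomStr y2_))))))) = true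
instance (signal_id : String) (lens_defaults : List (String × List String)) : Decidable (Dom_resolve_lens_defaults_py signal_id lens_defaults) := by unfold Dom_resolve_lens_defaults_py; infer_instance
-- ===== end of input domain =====

-- B replaces A's generate-each-dot-prefix-and-probe loop by a single scan of the
-- dict that keeps the longest key equal to signal_id or a dot-prefix of it (objective: alternative).

-- ===== PORT A =====
-- the `for i in range(len(parts)-1, 0, -1): … return …` loop, with early return
def pvALoop (d : PySem.Dict String (List String)) (parts : List String) : List Int → List String
  | [] => []
  | i :: rest =>
      let pfx := PySem.Str.join "." (PySem.List.slice parts none (some i))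
      match PySem.Dict.get? d pfx with
      | some v => v
      | none => pvALoop d parts rest

def resolve_lens_defaults_py (signal_id : String) (lens_defaults : List (String × List String)) : List String :=
  let d := PySem.Dict.mk lens_defaults
  match PySem.Dict.get? d signal_id with
  | some v => v
  | none =>
      -- signal_id.split("."): the separator is the non-empty literal ".", so split? is always `some` (exact)
      let parts := (PySem.Str.split? signal_id ".").getD []
      pvALoop d parts (PySem.List.pyRange ((parts.length : Int) - 1) 0 (-1))

-- ===== PORT B =====
-- loop body of B: keep the longest key that is signal_id or a dot-prefix of it
def pvBStep (signal_id : String) (best : Option String) (kv : String × List String) : Option String :=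
  if kv.1 == signal_id || PySem.Str.startswith signal_id (kv.1 ++ ".") then
    match best with
    | none => some kv.1
    | some b => if PySem.Str.len b < PySem.Str.len kv.1 then some kv.1 else best
  else best

def resolve_lens_defaults_py_alt (signal_id : String) (lens_defaults : List (String × List String)) : List String :=
  match lens_defaults.foldl (pvBStep signal_id) none with
  | some k => (PySem.Dict.get? (PySem.Dict.mk lens_defaults) k).getD []  -- `lens_defaults[best]`: key always present, default unreachable
  | none => []

-- ===== PRECONDITION & SPEC =====
def Spec_resolve_lens_defaults_py (signal_id : String) (lens_defaults : List (String × List String)) (out : List String) : Prop := out = resolve_lens_defaults_py_alt signal_id lens_defaults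
instance (signal_id : String) (lens_defaults : List (String × List String)) (out : List String) : Decidable (Spec_resolve_lens_defaults_py signal_id lens_defaults out) := by unfold Spec_resolve_lens_defaults_py; infer_instance

-- ===== CLAIM (what is proved, stated in full; the proofs are below) =====
def Claim_equal_resolve_lens_defaults_py : Prop := ∀ (signal_id : String) (lens_defaults : List (String × List String)), Dom_resolve_lens_defaults_py signal_id lens_defaults → Spec_resolve_lens_defaults_py signal_id lens_defaults (resolve_lens_defaults_py signal_id lens_defaults)

-- ===== LEMMAS AND PROOFS =====

-- `s.split(".")` modelled by a plain structural recursion: (first piece, later pieces)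
def pvPcs : List Char → List Char × List (List Char)
  | [] => ([], [])
  | a :: t => let r := pvPcs t; if a = '.' then ([], r.1 :: r.2) else (a :: r.1, r.2)

def pvParts (t : List Char) : List (List Char) := (pvPcs t).1 :: (pvPcs t).2

lemma pvGo_spec : ∀ (fuel : Nat) (l cur : List Char) (acc : List (List Char)), l.length ≤ fuel →
    PySem.Chars.splitOn.go ['.'] fuel l cur acc
      = acc.reverse ++ (cur.reverse ++ (pvPcs l).1) :: (pvPcs l).2 := by
  intro fuel
  induction fuel with
  | zero =>
    intro l cur acc h
    have : l = [] := by cases l <;> simp_all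
    subst this
    rw [PySem.Chars.splitOn.go.eq_def]
    simp [pvPcs]
  | succ fuel ih =>
    intro l cur acc h
    cases l with
    | nil =>
      rw [PySem.Chars.splitOn.go.eq_def]
      simp [pvPcs]
    | cons a t =>
      rw [PySem.Chars.splitOn.go.eq_def]
      simp only [List.isPrefixOf, Bool.and_true]
      by_cases ha : a = '.'
      · subst ha
        rw [if_pos (by simp)]
        simp only [List.length, List.drop_succ_cons, List.drop_zero]
        rw [ih t [] ((cur.reverse :: acc)) (by simpa using h)]
        simp [pvPcs]
      · rw [if_neg (by simp [beq_iff_eq]; exact fun hh => ha hh.symm)]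
        rw [ih t (a :: cur) acc (by simpa using h)]
        simp [pvPcs, ha]

lemma pvSplitOn_eq (t : List Char) : PySem.Chars.splitOn t ['.'] = pvParts t := by
  unfold PySem.Chars.splitOn
  rw [pvGo_spec (t.length + 1) t [] [] (by omega)]
  simp [pvParts]

lemma pvJoin_pvParts (t : List Char) : List.intercalate ['.'] (pvParts t) = t := by
  induction t with
  | nil => simp [pvParts, pvPcs, List.intercalate]
  | cons a t ih =>
    unfold pvParts pvPcs
    by_cases ha : a = '.'
    · subst ha
      rw [if_pos rfl]
      rw [show List.intercalate ['.'] ([] :: (pvPcs t).1 :: (pvPcs t).2)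
            = [] ++ ['.'] ++ List.intercalate ['.'] ((pvPcs t).1 :: (pvPcs t).2) by
          simp [List.intercalate, List.intersperse]]
      simpa [pvParts] using ih
    · simp only [if_neg ha]
      cases h2 : (pvPcs t).2 with
      | nil =>
        have := ih
        unfold pvParts at this
        rw [h2] at this
        simp [List.intercalate] at this ⊢
        simpa using this
      | cons q r =>
        have := ih
        unfold pvParts at this
        rw [h2] at this
        simp only [List.intercalate, List.intersperse] at this ⊢
        simpa using this

lemma pvDotfree (t : List Char) : ∀ p ∈ pvParts t, '.' ∉ p := by
  induction t with
  | nil => simp [pvParts, pvPcs]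
  | cons a t ih =>
    unfold pvParts pvPcs
    by_cases ha : a = '.'
    · subst ha
      rw [if_pos rfl]
      intro p hp
      rcases List.mem_cons.mp hp with hp | hp
      · simp [hp]
      · exact ih p (by simpa [pvParts] using hp)
    · simp only [if_neg ha]
      intro p hp
      rcases List.mem_cons.mp hp with hp | hp
      · subst hp
        intro hmem
        rcases List.mem_cons.mp hmem with h | h
        · exact ha h.symm
        · exact ih (pvPcs t).1 (by simp [pvParts]) h
      · exact ih p (by simp [pvParts, hp])

lemma pvIc_cons (p : List Char) (l : List (List Char)) (h : l ≠ []) :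
    List.intercalate ['.'] (p :: l) = p ++ ['.'] ++ List.intercalate ['.'] l := by
  cases l with
  | nil => exact absurd rfl h
  | cons q r => simp [List.intercalate, List.intersperse]

-- the crux: k. ++ "." is a prefix of ".".join(parts) iff k is ".".join(parts[:i]) for some 0 < i < len(parts)
lemma pvPrefix_char (parts : List (List Char)) (hf : ∀ p ∈ parts, '.' ∉ p) (k : List Char) :
    (k ++ ['.'] <+: List.intercalate ['.'] parts)
      ↔ ∃ i, 1 ≤ i ∧ i < parts.length ∧ k = List.intercalate ['.'] (parts.take i) := by
  induction parts generalizing k with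
  | nil =>
    simp [List.intercalate]
  | cons p rest ih =>
    cases rest with
    | nil =>
      constructor
      · intro h
        exfalso
        have hsub : '.' ∈ p := by
          have : '.' ∈ k ++ ['.'] := by simp
          have hle := h.subset this
          simpa [List.intercalate] using hle
        exact hf p (by simp) hsub
      · rintro ⟨i, h1, h2, -⟩
        simp at h2; omega
    | cons q rest' =>
      have hrest : (q :: rest' : List (List Char)) ≠ [] := by simp
      rw [pvIc_cons p _ hrest]
      have hfrest : ∀ x ∈ q :: rest', '.' ∉ x := fun x hx => hf x (by simp [hx])
      have hfp : '.' ∉ p := hf p (by simp)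
      constructor
      · intro h
        rcases lt_trichotomy k.length p.length with hlt | heq | hgt
        · exfalso
          have hp : p <+: p ++ ['.'] ++ List.intercalate ['.'] (q :: rest') := by
            simpa [List.append_assoc] using List.prefix_append p (['.'] ++ List.intercalate ['.'] (q :: rest'))
          have := List.prefix_of_prefix_length_le h hp (by simp; omega)
          exact hfp (this.subset (by simp))
        · -- k = p
          have hk : k <+: p ++ ['.'] ++ List.intercalate ['.'] (q :: rest') :=
            (List.prefix_append k ['.']).trans h
          have hp : p <+: p ++ ['.'] ++ List.intercalate ['.'] (q :: rest') := by
            simpa [List.append_assoc] using List.prefix_append p (['.'] ++ List.intercalate ['.'] (q :: rest'))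
          have hkp : k = p := (List.prefix_of_prefix_length_le hk hp (by omega)).eq_of_length heq
          exact ⟨1, le_refl 1, by simp, by simp [List.intercalate, hkp]⟩
        · -- p ++ '.' is a proper prefix of k
          have hpk : p ++ ['.'] <+: k := by
            have hp : p ++ ['.'] <+: p ++ ['.'] ++ List.intercalate ['.'] (q :: rest') := by
              simpa [List.append_assoc] using List.prefix_append (p ++ ['.']) (List.intercalate ['.'] (q :: rest'))
            have hk : k <+: p ++ ['.'] ++ List.intercalate ['.'] (q :: rest') :=
              (List.prefix_append k ['.']).trans h
            exact List.prefix_of_prefix_length_le hp hk (by simp; omega)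
          obtain ⟨k', rfl⟩ := hpk
          have h' : k' ++ ['.'] <+: List.intercalate ['.'] (q :: rest') := by
            have := h
            rw [List.append_assoc, List.append_assoc] at this
            rw [List.append_assoc] at this
            exact (List.prefix_append_right_inj (p ++ ['.'])).mp (by simpa [List.append_assoc] using this)
          obtain ⟨i, h1, h2, h3⟩ := (ih hfrest k').mp h'
          refine ⟨i + 1, by omega, by simp at h2 ⊢; omega, ?_⟩
          have htake : (p :: q :: rest').take (i + 1) = p :: (q :: rest').take i := by simp
          rw [htake, pvIc_cons p _ (by cases i with | zero => omega | succ j => simp)]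
          simp [h3, List.append_assoc]
      · rintro ⟨i, h1, h2, rfl⟩
        cases i with
        | zero => omega
        | succ j =>
          cases j with
          | zero =>
            simp only [List.take, List.intercalate]
            simp [List.intercalate, List.append_assoc]
          | succ j' =>
            have htake : (p :: q :: rest').take (j' + 1 + 1) = p :: (q :: rest').take (j' + 1) := by simp
            rw [htake, pvIc_cons p _ (by simp)]
            have hsub : List.intercalate ['.'] ((q :: rest').take (j' + 1)) ++ ['.']
                <+: List.intercalate ['.'] (q :: rest') := by
              apply (ih hfrest _).mpr
              exact ⟨j' + 1, by omega, by simp at h2 ⊢; omega, rfl⟩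
            have hfin : p ++ ['.'] ++ (List.intercalate ['.'] ((q :: rest').take (j' + 1)) ++ ['.'])
                <+: p ++ ['.'] ++ List.intercalate ['.'] (q :: rest') :=
              (List.prefix_append_right_inj (p ++ ['.'])).mpr hsub
            simpa [List.append_assoc] using hfin

lemma pvLen_mono (parts : List (List Char)) (hf : ∀ p ∈ parts, '.' ∉ p) (i j : Nat)
    (h1 : 1 ≤ i) (hij : i < j) (hj : j ≤ parts.length) :
    (List.intercalate ['.'] (parts.take i)).length < (List.intercalate ['.'] (parts.take j)).length := by
  have hf' : ∀ p ∈ parts.take j, '.' ∉ p := fun p hp => hf p (List.take_subset j parts hp)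
  have hpre : List.intercalate ['.'] (parts.take i) ++ ['.'] <+: List.intercalate ['.'] (parts.take j) := by
    apply (pvPrefix_char (parts.take j) hf' _).mpr
    refine ⟨i, h1, by simp [List.length_take]; omega, ?_⟩
    rw [List.take_take, Nat.min_eq_left (le_of_lt hij)]
  have := hpre.length_le
  simp at this
  omega

-- ---- string-level abbreviations for one fixed signal_id ----

def pvJS (t : List Char) (i : Nat) : String := String.ofList (List.intercalate ['.'] ((pvParts t).take i))

def pvMatch (s k : String) : Bool := k == s || PySem.Str.startswith s (k ++ ".")

lemma pvJS_top (s : String) : pvJS s.toList (pvParts s.toList).length = s := by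
  unfold pvJS
  rw [List.take_length, pvJoin_pvParts, String.ofList_toList]

lemma pvJS_len_mono (s : String) (i j : Nat) (h1 : 1 ≤ i) (hij : i < j) (hj : j ≤ (pvParts s.toList).length) :
    PySem.Str.len (pvJS s.toList i) < PySem.Str.len (pvJS s.toList j) := by
  unfold pvJS PySem.Str.len
  rw [String.toList_ofList, String.toList_ofList]
  exact_mod_cast pvLen_mono _ (pvDotfree s.toList) i j h1 hij hj

lemma pvMatch_iff (s k : String) :
    pvMatch s k = true ↔ ∃ i, 1 ≤ i ∧ i ≤ (pvParts s.toList).length ∧ k = pvJS s.toList i := by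
  unfold pvMatch
  rw [Bool.or_eq_true, beq_iff_eq, PySem.Str.startswith_eq, PySem.Chars.startswith_iff]
  have hts : (k ++ ".").toList = k.toList ++ ['.'] := by simp [String.toList_append]
  constructor
  · rintro (rfl | hpre)
    · refine ⟨(pvParts k.toList).length, ?_, le_refl _, (pvJS_top k).symm⟩
      unfold pvParts; simp
    · rw [hts] at hpre
      rw [show s.toList = List.intercalate ['.'] (pvParts s.toList) from (pvJoin_pvParts s.toList).symm] at hpre
      obtain ⟨i, h1, h2, h3⟩ := (pvPrefix_char _ (pvDotfree s.toList) k.toList).mp hpre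
      refine ⟨i, h1, le_of_lt h2, ?_⟩
      rw [← @String.ofList_toList k, h3]
      rfl
  · rintro ⟨i, h1, h2, rfl⟩
    rcases eq_or_lt_of_le h2 with rfl | hlt
    · left; exact pvJS_top s
    · right
      rw [hts]
      unfold pvJS
      rw [String.toList_ofList]
      conv_rhs => rw [show s.toList = List.intercalate ['.'] (pvParts s.toList) from (pvJoin_pvParts s.toList).symm]
      exact (pvPrefix_char _ (pvDotfree s.toList) _).mpr ⟨i, h1, hlt, rfl⟩

-- ---- dict helpers ----

lemma pvKey_mem_of_get?_some {ld : List (String × List String)} {k : String} {v : List String}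
    (h : PySem.Dict.get? (PySem.Dict.mk ld) k = some v) : ∃ p ∈ ld, p.1 = k := by
  unfold PySem.Dict.get? at h
  rcases Option.map_eq_some_iff.mp h with ⟨p, hp, -⟩
  exact ⟨p, List.mem_of_find?_eq_some hp, by
    have := List.find?_some hp
    exact beq_iff_eq.mp this⟩

lemma pvGet?_isSome_of_key_mem {ld : List (String × List String)} {p : String × List String}
    (h : p ∈ ld) : (PySem.Dict.get? (PySem.Dict.mk ld) p.1).isSome := by
  unfold PySem.Dict.get?
  rw [Option.isSome_map]
  exact List.find?_isSome.mpr ⟨p, h, by simp⟩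

-- ---- fold (B) invariants ----

lemma pvBStep_eq (s : String) (best : Option String) (kv : String × List String) :
    pvBStep s best kv = if pvMatch s kv.1 then
      (match best with
       | none => some kv.1
       | some b => if PySem.Str.len b < PySem.Str.len kv.1 then some kv.1 else best)
      else best := rfl

lemma pvFold_none (s : String) (l : List (String × List String)) :
    ∀ acc, l.foldl (pvBStep s) acc = none → acc = none ∧ ∀ kv ∈ l, pvMatch s kv.1 = false := by
  induction l with
  | nil => intro acc h; simpa using h
  | cons kv t ih =>
    intro acc h
    obtain ⟨hstep, hall⟩ := ih (pvBStep s acc kv) h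
    rw [pvBStep_eq] at hstep
    by_cases hm : pvMatch s kv.1
    · rw [if_pos hm] at hstep
      exfalso
      cases acc with
      | none => simp at hstep
      | some b =>
          split at hstep
          all_goals first
            | (split at hstep <;> simp at hstep)
            | simp at hstep
    · rw [if_neg hm] at hstep
      subst hstep
      refine ⟨rfl, ?_⟩
      intro kv' hkv'
      rcases List.mem_cons.mp hkv' with rfl | hmem
      · simpa using hm
      · exact hall kv' hmem

lemma pvFold_mono (s : String) (l : List (String × List String)) :
    ∀ acc b k, l.foldl (pvBStep s) acc = some k → acc = some b → PySem.Str.len b ≤ PySem.Str.len k := by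
  induction l with
  | nil =>
    intro acc b k h hacc
    subst hacc
    simp at h
    subst h
    exact le_refl _
  | cons kv t ih =>
    intro acc b k h hacc
    subst hacc
    rw [List.foldl_cons, pvBStep_eq] at h
    by_cases hm : pvMatch s kv.1
    · rw [if_pos hm] at h
      by_cases hlen : PySem.Str.len b < PySem.Str.len kv.1
      · simp only [hlen, if_pos] at h
        have := ih _ kv.1 k h rfl
        omega
      · simp only [hlen, if_neg, if_false] at h
        exact ih _ b k h rfl
    · rw [if_neg hm] at h
      exact ih _ b k h rfl

lemma pvFold_some (s : String) (l : List (String × List String)) :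
    ∀ acc k, l.foldl (pvBStep s) acc = some k →
      acc = some k ∨ (pvMatch s k = true ∧ ∃ v, (k, v) ∈ l) := by
  induction l with
  | nil => intro acc k h; left; simpa using h
  | cons kv t ih =>
    intro acc k h
    rcases ih _ k h with hstep | ⟨hm, v, hmem⟩
    · rw [pvBStep_eq] at hstep
      by_cases hm : pvMatch s kv.1
      · rw [if_pos hm] at hstep
        cases acc with
        | none =>
          simp at hstep
          right
          exact ⟨hstep ▸ hm, kv.2, by simp [← hstep]⟩
        | some b =>
          by_cases hlen : PySem.Str.len b < PySem.Str.len kv.1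
          · simp only [hlen, if_pos] at hstep
            right
            have hk : kv.1 = k := by simpa using hstep
            exact ⟨hk ▸ hm, kv.2, by simp [← hk]⟩
          · simp only [hlen, if_neg, if_false] at hstep
            left; exact hstep
      · rw [if_neg hm] at hstep
        left; exact hstep
    · right; exact ⟨hm, v, by simp [hmem]⟩

lemma pvFold_max (s : String) (l : List (String × List String)) :
    ∀ acc k, l.foldl (pvBStep s) acc = some k →
      ∀ kv ∈ l, pvMatch s kv.1 = true → PySem.Str.len kv.1 ≤ PySem.Str.len k := by
  induction l with
  | nil => intro acc k h kv hmem; simp at hmem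
  | cons kv0 t ih =>
    intro acc k h kv hmem hm
    rcases List.mem_cons.mp hmem with rfl | hmem'
    · -- the head: after the step the accumulator is some b' with len kv.1 ≤ len b'
      rw [List.foldl_cons, pvBStep_eq, if_pos hm] at h
      cases acc with
      | none => exact pvFold_mono s t _ kv.1 k h rfl
      | some b =>
        by_cases hlen : PySem.Str.len b < PySem.Str.len kv.1
        · simp only [hlen, if_pos] at h
          exact pvFold_mono s t _ kv.1 k h rfl
        · simp only [hlen, if_neg, if_false] at h
          have := pvFold_mono s t _ b k h rfl
          omega
    · exact ih _ k h kv hmem' hm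

-- ---- A-side loop characterisation ----

def pvAfind (d : PySem.Dict String (List String)) (parts : List String) : Nat → List String
  | 0 => []
  | m + 1 =>
      match PySem.Dict.get? d (PySem.Str.join "." (parts.take (m + 1))) with
      | some v => v
      | none => pvAfind d parts m

lemma pvPyRange_neg_one (m : Nat) :
    PySem.List.pyRange (m : Int) 0 (-1) = (List.range m).map (fun k : Nat => (m : Int) - (k : Int)) := by
  unfold PySem.List.pyRange
  rw [if_neg (by norm_num)]
  rw [if_neg (by norm_num)]
  cases m with
  | zero => rw [if_neg (by norm_num)]; simp
  | succ n =>
    rw [if_pos (by exact_mod_cast Nat.succ_pos n)]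
    have hc : (((n : Int) + 1 - 0 + -(-1) - 1) / -(-1)).toNat = n + 1 := by norm_num
    push_cast at hc ⊢
    rw [show ((n : Int) + 1 - 0 + 1 - 1) = (n : Int) + 1 by ring]
    rw [show ((n : Int) + 1) / 1 = (n : Int) + 1 by simp]
    rw [show ((n : Int) + 1).toNat = n + 1 by omega]
    apply List.map_congr_left
    intro k hk
    ring

lemma pvALoop_eq_afind (d : PySem.Dict String (List String)) (parts : List String) (m : Nat) :
    pvALoop d parts ((List.range m).map (fun k : Nat => (m : Int) - (k : Int))) = pvAfind d parts m := by
  induction m with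
  | zero => simp [pvALoop, pvAfind]
  | succ n ih =>
    rw [List.range_succ_eq_map]
    simp only [List.map_cons, List.map_map]
    rw [show (((n + 1 : Nat) : Int) - ((0 : Nat) : Int)) = ((n + 1 : Nat) : Int) by push_cast; ring]
    have hmap : (List.map ((fun k : Nat => (((n + 1 : Nat) : Int) - (k : Int))) ∘ Nat.succ) (List.range n))
        = List.map (fun k : Nat => (n : Int) - (k : Int)) (List.range n) := by
      apply List.map_congr_left
      intro k hk
      simp only [Function.comp]
      push_cast
      ring
    rw [hmap]
    unfold pvALoop
    rw [PySem.List.slice_to parts (by positivity)]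
    rw [show (((n + 1 : Nat) : Int)).toNat = n + 1 by omega]
    unfold pvAfind
    cases h : PySem.Dict.get? d (PySem.Str.join "." (parts.take (n + 1))) with
    | some v => simp [h]
    | none => simp [h, ih]

lemma pvAfind_none (d : PySem.Dict String (List String)) (parts : List String) (m : Nat)
    (h : ∀ i, 1 ≤ i → i ≤ m → PySem.Dict.get? d (PySem.Str.join "." (parts.take i)) = none) :
    pvAfind d parts m = [] := by
  induction m with
  | zero => rfl
  | succ n ih =>
    unfold pvAfind
    rw [h (n + 1) (by omega) (by omega)]
    exact ih (fun i h1 h2 => h i h1 (by omega))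

lemma pvAfind_found (d : PySem.Dict String (List String)) (parts : List String) (m i : Nat)
    (h1 : 1 ≤ i) (him : i ≤ m)
    (hsome : (PySem.Dict.get? d (PySem.Str.join "." (parts.take i))).isSome)
    (habove : ∀ j, i < j → j ≤ m → PySem.Dict.get? d (PySem.Str.join "." (parts.take j)) = none) :
    pvAfind d parts m = (PySem.Dict.get? d (PySem.Str.join "." (parts.take i))).getD [] := by
  induction m with
  | zero => omega
  | succ n ih =>
    unfold pvAfind
    by_cases hi : i = n + 1
    · subst hi
      cases h : PySem.Dict.get? d (PySem.Str.join "." (parts.take (n + 1))) with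
      | some v => simp [h]
      | none => rw [h] at hsome; simp at hsome
    · rw [habove (n + 1) (by omega) (by omega)]
      exact ih (by omega) (fun j hj1 hj2 => habove j hj1 (by omega))

lemma pvSplit_port (s : String) :
    (PySem.Str.split? s ".").getD [] = (pvParts s.toList).map String.ofList := by
  unfold PySem.Str.split? PySem.Chars.split?
  rw [show ("." : String).toList = ['.'] from rfl]
  rw [if_neg (by simp)]
  simp [pvSplitOn_eq]

lemma pvJoin_take (s : String) (i : Nat) :
    PySem.Str.join "." (((pvParts s.toList).map String.ofList).take i) = pvJS s.toList i := by
  unfold PySem.Str.join pvJS PySem.Chars.join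
  congr 1
  simp [Function.comp_def, String.toList_ofList]

-- ---- main equivalence ----

lemma pvMain (s : String) (ld : List (String × List String)) :
    resolve_lens_defaults_py s ld = resolve_lens_defaults_py_alt s ld := by
  simp only [resolve_lens_defaults_py, resolve_lens_defaults_py_alt]
  have hn1 : 1 ≤ (pvParts s.toList).length := by unfold pvParts; simp
  cases hr : ld.foldl (pvBStep s) none with
  | none =>
    obtain ⟨-, hnone⟩ := pvFold_none s ld none hr
    have hget : ∀ i, 1 ≤ i → i ≤ (pvParts s.toList).length →
        PySem.Dict.get? (PySem.Dict.mk ld) (pvJS s.toList i) = none := by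
      intro i h1 h2
      cases hx : PySem.Dict.get? (PySem.Dict.mk ld) (pvJS s.toList i) with
      | none => rfl
      | some v =>
        exfalso
        obtain ⟨p, hp, hpk⟩ := pvKey_mem_of_get?_some hx
        have hmt : pvMatch s p.1 = true := by
          rw [hpk]; exact (pvMatch_iff s _).mpr ⟨i, h1, h2, rfl⟩
        rw [hnone p hp] at hmt
        exact Bool.noConfusion hmt
    have hx : PySem.Dict.get? (PySem.Dict.mk ld) s = none := by
      have := hget (pvParts s.toList).length hn1 (le_refl _)
      rwa [pvJS_top] at this
    rw [hx, pvSplit_port]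
    simp only [List.length_map]
    rw [show (((pvParts s.toList).length : Int) - 1)
          = (((pvParts s.toList).length - 1 : Nat) : Int) by omega]
    rw [pvPyRange_neg_one, pvALoop_eq_afind]
    exact pvAfind_none _ _ _ (fun i h1 h2 => by
      rw [pvJoin_take]; exact hget i h1 (by omega))
  | some k =>
    rcases pvFold_some s ld none k hr with hbad | ⟨hmk, v0, hmem0⟩
    · simp at hbad
    obtain ⟨i, hi1, hin, rfl⟩ := (pvMatch_iff s k).mp hmk
    have hksome : (PySem.Dict.get? (PySem.Dict.mk ld) (pvJS s.toList i)).isSome :=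
      pvGet?_isSome_of_key_mem (p := (pvJS s.toList i, v0)) hmem0
    cases hx : PySem.Dict.get? (PySem.Dict.mk ld) s with
    | some v =>
      -- exact hit: the fold must have kept signal_id itself
      show v = (PySem.Dict.get? (PySem.Dict.mk ld) (pvJS s.toList i)).getD []
      have hieq : i = (pvParts s.toList).length := by
        by_contra hne
        have hilt : i < (pvParts s.toList).length := lt_of_le_of_ne hin hne
        obtain ⟨p, hp, hpk⟩ := pvKey_mem_of_get?_some hx
        have hms : pvMatch s p.1 = true := by rw [hpk]; simp [pvMatch]
        have hle := pvFold_max s ld none (pvJS s.toList i) hr p hp hms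
        rw [hpk] at hle
        have hslen : PySem.Str.len s = PySem.Str.len (pvJS s.toList (pvParts s.toList).length) := by
          rw [pvJS_top]
        rw [hslen] at hle
        have := pvJS_len_mono s i (pvParts s.toList).length hi1 hilt (le_refl _)
        omega
      subst hieq
      rw [pvJS_top, hx]
      rfl
    | none =>
      have hilt : i < (pvParts s.toList).length := by
        rcases lt_or_eq_of_le hin with h | h
        · exact h
        · exfalso; rw [h, pvJS_top, hx] at hksome; exact Bool.noConfusion hksome
      show pvALoop (PySem.Dict.mk ld) ((PySem.Str.split? s ".").getD [])
            (PySem.List.pyRange ((((PySem.Str.split? s ".").getD []).length : Int) - 1) 0 (-1))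
          = (PySem.Dict.get? (PySem.Dict.mk ld) (pvJS s.toList i)).getD []
      rw [pvSplit_port]
      simp only [List.length_map]
      rw [show (((pvParts s.toList).length : Int) - 1)
            = (((pvParts s.toList).length - 1 : Nat) : Int) by omega]
      rw [pvPyRange_neg_one, pvALoop_eq_afind]
      rw [pvAfind_found (PySem.Dict.mk ld) _ ((pvParts s.toList).length - 1) i hi1 (by omega)
            (by rw [pvJoin_take]; exact hksome)
            (fun j hj1 hj2 => by
              rw [pvJoin_take]
              cases hxj : PySem.Dict.get? (PySem.Dict.mk ld) (pvJS s.toList j) with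
              | none => rfl
              | some w =>
                exfalso
                obtain ⟨p, hp, hpk⟩ := pvKey_mem_of_get?_some hxj
                have hmj : pvMatch s p.1 = true := by
                  rw [hpk]; exact (pvMatch_iff s _).mpr ⟨j, by omega, by omega, rfl⟩
                have hle := pvFold_max s ld none (pvJS s.toList i) hr p hp hmj
                rw [hpk] at hle
                have := pvJS_len_mono s i j hi1 hj1 (by omega)
                omega)]
      rw [pvJoin_take]

-- ===== VERDICT (by name: the statement is the Claim_ definition above) =====
theorem resolve_lens_defaults_py_spec : Claim_equal_resolve_lens_defaults_py := by
  intro s ld _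
  unfold Spec_resolve_lens_defaults_py
  exact pvMain s ld
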